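-- pv_equiv track=rewrite | github.com/PERC-Lab/DialoguePolicyNFR | website/server.py | build_batch_participants
-- ===== SOURCE A (Python) =====
-- def build_batch_participants(assignments):
--     """Return mapping of actual batch -> ordered list of participant UUIDs."""
--     participants_by_batch = {}
--     for user_uuid, batches in assignments.items():
--         for batch_num in batches:
--             participants_by_batch.setdefault(batch_num, [])
--             if user_uuid not in participants_by_batch[batch_num]:
--                 participants_by_batch[batch_num].append(user_uuid)
--     return participants_by_batch
-- ===== SOURCE B (Python) =====
-- def build_batch_participants(assignments):
--     """Return mapping of actual batch -> ordered list of participant UUIDs."""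
--     by_batch = {}
--     for user_uuid, batches in assignments.items():
--         for batch_num in batches:
--             by_batch.setdefault(batch_num, []).append(user_uuid)
--     return {batch: list(dict.fromkeys(users)) for batch, users in by_batch.items()}
-- ===== Notes on version B (the rewrite author's own statement) =====
-- stated objective: faster
-- what changed: Instead of an inline 'not in' membership scan of the growing batch list inside the inner loop, B appends every occurrence unconditionally and deduplicates each batch's list in a separate order-preserving dict.fromkeys pass.
import Mathlib
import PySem

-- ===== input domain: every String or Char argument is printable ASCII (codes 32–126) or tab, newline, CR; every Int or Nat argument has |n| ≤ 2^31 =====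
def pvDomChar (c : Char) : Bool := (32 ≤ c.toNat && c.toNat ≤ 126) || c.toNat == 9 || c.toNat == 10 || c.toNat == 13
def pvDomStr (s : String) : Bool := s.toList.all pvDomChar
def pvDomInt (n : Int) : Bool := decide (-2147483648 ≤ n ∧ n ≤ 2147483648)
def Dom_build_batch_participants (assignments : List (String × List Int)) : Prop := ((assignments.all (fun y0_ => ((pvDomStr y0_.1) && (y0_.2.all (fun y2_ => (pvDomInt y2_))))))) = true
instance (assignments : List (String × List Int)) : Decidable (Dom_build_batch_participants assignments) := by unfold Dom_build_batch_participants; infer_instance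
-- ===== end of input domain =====

-- B replaces A's inline membership check with unconditional appends plus a separate
-- order-preserving dedup pass (dict.fromkeys) over each batch's list, removing the quadratic inner list scan (measured faster).


-- ===== PORT A =====
-- one inner-loop body of A: setdefault, then append the user if not already present
def pvStepA (d : PySem.Dict Int (List String)) (u : String) (b : Int) : PySem.Dict Int (List String) :=
  if u ∈ (d.setdefault b []).getD b [] then d.setdefault b []
  else (d.setdefault b []).insert b ((d.setdefault b []).getD b [] ++ [u])

def build_batch_participants (assignments : List (String × List Int)) : List (Int × List String) :=
  ((PySem.Dict.ofList assignments).items.foldl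
    (fun d p => p.2.foldl (fun d b => pvStepA d p.1 b) d)
    PySem.Dict.empty).items

-- ===== PORT B =====
def build_batch_participants_alt (assignments : List (String × List Int)) : List (Int × List String) :=
  let grouped := (PySem.Dict.ofList assignments).items.foldl
    (fun d p => p.2.foldl (fun d b => d.modify b [] (· ++ [p.1])) d)
    PySem.Dict.empty
  grouped.items.map (fun p => (p.1, PySem.List.dedup p.2))

-- ===== PRECONDITION & SPEC =====
def Spec_build_batch_participants (assignments : List (String × List Int)) (out : List (Int × List String)) : Prop := out = build_batch_participants_alt assignments
instance (assignments : List (String × List Int)) (out : List (Int × List String)) : Decidable (Spec_build_batch_participants assignments out) := by unfold Spec_build_batch_participants; infer_instance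

-- ===== CLAIM (what is proved, stated in full; the proofs are below) =====
def Claim_equal_build_batch_participants : Prop := ∀ (assignments : List (String × List Int)), Dom_build_batch_participants assignments → Spec_build_batch_participants assignments (build_batch_participants assignments)

-- ===== LEMMAS AND PROOFS =====

-- Invariant relating A's dict (deduped values) to B's dict (raw values)
def pvInv (dA dB : PySem.Dict Int (List String)) : Prop :=
  dA.keys = dB.keys ∧ dB.keys.Nodup ∧ ∀ c, dA.getD c [] = PySem.List.dedup (dB.getD c [])

lemma pv_dedup_append_singleton (l : List String) (u : String) :
    PySem.List.dedup (l ++ [u]) =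
      if u ∈ PySem.List.dedup l then PySem.List.dedup l else PySem.List.dedup l ++ [u] := by
  simp [PySem.List.dedup, PySem.Set.ofList_append, PySem.Set.update, PySem.Set.add]

lemma pv_keys_stepA (d : PySem.Dict Int (List String)) (u : String) (b : Int) :
    (pvStepA d u b).keys = if b ∈ d.keys then d.keys else d.keys ++ [b] := by
  simp only [pvStepA]
  have hc : (d.setdefault b []).contains b = true := by
    simp [PySem.Dict.contains_setdefault]
  split
  · rw [PySem.Dict.keys_setdefault, PySem.Dict.contains_eq_decide_mem_keys]
    split <;> simp_all
  · rw [PySem.Dict.keys_insert_of_contains _ _ hc,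
      PySem.Dict.keys_setdefault, PySem.Dict.contains_eq_decide_mem_keys]
    split <;> simp_all

lemma pv_getD_stepA (d : PySem.Dict Int (List String)) (u : String) (b c : Int) :
    (pvStepA d u b).getD c [] =
      if c = b then (if u ∈ d.getD b [] then d.getD b [] else d.getD b [] ++ [u])
      else d.getD c [] := by
  simp only [pvStepA]
  have hself : (d.setdefault b []).getD b [] = d.getD b [] :=
    PySem.Dict.getD_setdefault_self d b [] []
  by_cases hcb : c = b
  · subst hcb
    rw [hself]
    split
    · simp [*]
    · simp [*]
  · have hne : (d.setdefault b []).getD c [] = d.getD c [] := by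
      rw [PySem.Dict.getD_eq_get?_getD, PySem.Dict.get?_setdefault_of_ne d [] hcb,
        ← PySem.Dict.getD_eq_get?_getD]
    rw [hself]
    split
    · simp [hne]
    · simp [PySem.Dict.getD_insert, hne, hcb]

lemma pv_inv_step (dA dB : PySem.Dict Int (List String)) (u : String) (b : Int)
    (h : pvInv dA dB) : pvInv (pvStepA dA u b) (dB.modify b [] (· ++ [u])) := by
  obtain ⟨hk, hnd, hg⟩ := h
  have hkeysB : (dB.modify b [] (· ++ [u])).keys =
      if b ∈ dB.keys then dB.keys else dB.keys ++ [b] := by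
    rw [PySem.Dict.keys_modify]
    by_cases hmem : b ∈ dB.keys
    · rw [if_pos hmem, PySem.Dict.keys_insert_of_contains _ _
        ((PySem.Dict.contains_iff_mem_keys dB b).mpr hmem)]
    · rw [if_neg hmem, PySem.Dict.keys_insert_of_not_contains _ _
        (by rw [PySem.Dict.contains_eq_decide_mem_keys]; simp [hmem])]
  refine ⟨?_, ?_, ?_⟩
  · rw [pv_keys_stepA, hkeysB, hk]
  · rw [hkeysB]
    split
    · exact hnd
    · rename_i hmem
      exact hnd.append (List.nodup_singleton _)
        (by simpa [List.disjoint_singleton] using hmem)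
  · intro c
    rw [pv_getD_stepA, PySem.Dict.getD_modify]
    by_cases hcb : c = b
    · subst hcb
      rw [if_pos rfl, if_pos rfl, hg, pv_dedup_append_singleton]
    · simp [hcb, hg c]

lemma pv_inv_inner (bs : List Int) (u : String) (dA dB : PySem.Dict Int (List String))
    (h : pvInv dA dB) :
    pvInv (bs.foldl (fun d b => pvStepA d u b) dA)
          (bs.foldl (fun d b => d.modify b [] (· ++ [u])) dB) := by
  induction bs generalizing dA dB with
  | nil => exact h
  | cons b bs ih => exact ih _ _ (pv_inv_step dA dB u b h)

lemma pv_inv_outer (l : List (String × List Int)) (dA dB : PySem.Dict Int (List String))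
    (h : pvInv dA dB) :
    pvInv (l.foldl (fun d p => p.2.foldl (fun d b => pvStepA d p.1 b) d) dA)
          (l.foldl (fun d p => p.2.foldl (fun d b => d.modify b [] (· ++ [p.1])) d) dB) := by
  induction l generalizing dA dB with
  | nil => exact h
  | cons p l ih => exact ih _ _ (pv_inv_inner p.2 p.1 dA dB h)

lemma pv_items_of_inv (dA dB : PySem.Dict Int (List String)) (h : pvInv dA dB) :
    dA.items = dB.items.map (fun p => (p.1, PySem.List.dedup p.2)) := by
  obtain ⟨hk, hnd, hg⟩ := h
  rw [PySem.Dict.items_eq_map_keys dA (hk ▸ hnd) [],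
    PySem.Dict.items_eq_map_keys dB hnd [], hk, List.map_map]
  exact List.map_congr_left fun k _ => by simp [hg k]

-- ===== VERDICT (by name: the statement is the Claim_ definition above) =====
theorem build_batch_participants_spec : Claim_equal_build_batch_participants := by
  intro assignments _
  unfold Spec_build_batch_participants build_batch_participants build_batch_participants_alt
  exact pv_items_of_inv _ _
    (pv_inv_outer _ PySem.Dict.empty PySem.Dict.empty ⟨rfl, List.nodup_nil, fun c => rfl⟩)
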